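-- pv_equiv track=rewrite | github.com/riebschlager/mp3-collection | archive/compile_itunes_exports.py | get_unified_headers
-- ===== SOURCE A (Python) =====
-- from typing import List, Dict, Set
--
-- def get_unified_headers(all_headers: List[Set[str]]) -> List[str]:
--     """
--     Create a unified header list from all files
--     """
--     # Get all unique headers
--     all_fields = set()
--     for headers in all_headers:
--         all_fields.update(headers)
--
--     # Define preferred order for common fields
--     preferred_order = [
--         'Name', 'Artist', 'Composer', 'Album', 'Grouping', 'Genre',
--         'Size', 'Time', 'Disc Number', 'Disc Count', 'Track Number', 'Track Count',
--         'Year', 'Date Modified', 'Date', 'Date Added',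
--         'Bit Rate', 'Sample Rate', 'Volume Adjustment',
--         'Kind', 'Equalizer', 'Comments',
--         'Play Count', 'Last Played', 'My Rating',
--         'Location'
--     ]
--
--     # Start with preferred fields that exist
--     unified = [field for field in preferred_order if field in all_fields]
--
--     # Add any remaining fields
--     remaining = sorted(all_fields - set(unified) - {'_source_file', '_line_number'})
--     unified.extend(remaining)
--
--     # Add metadata fields at the end
--     unified.extend(['_source_file', '_line_number'])
--
--     return unified
-- ===== SOURCE B (Python) =====
-- from typing import List, Set
--
--
-- def get_unified_headers(all_headers: List[Set[str]]) -> List[str]: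
--     """
--     Create a unified header list from all files
--     """
--     preferred_order = [
--         'Name', 'Artist', 'Composer', 'Album', 'Grouping', 'Genre',
--         'Size', 'Time', 'Disc Number', 'Disc Count', 'Track Number', 'Track Count',
--         'Year', 'Date Modified', 'Date', 'Date Added',
--         'Bit Rate', 'Sample Rate', 'Volume Adjustment',
--         'Kind', 'Equalizer', 'Comments',
--         'Play Count', 'Last Played', 'My Rating',
--         'Location'
--     ]
--     rank = {field: i for i, field in enumerate(preferred_order)}
--
--     all_fields = set()
--     for headers in all_headers:
--         all_fields |= headers
--
--     fields = all_fields - {'_source_file', '_line_number'}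
--     unified = sorted(fields, key=lambda f: (rank.get(f, len(preferred_order)), f))
--     unified += ['_source_file', '_line_number']
--     return unified
-- ===== Notes on version B (the rewrite author's own statement) =====
-- stated objective: simpler
-- what changed: Replaces A's preferred-filter list plus separate sort of the leftover set plus concatenation by one rank dict and a single sort of all non-metadata fields keyed by (rank, name).
import Mathlib
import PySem

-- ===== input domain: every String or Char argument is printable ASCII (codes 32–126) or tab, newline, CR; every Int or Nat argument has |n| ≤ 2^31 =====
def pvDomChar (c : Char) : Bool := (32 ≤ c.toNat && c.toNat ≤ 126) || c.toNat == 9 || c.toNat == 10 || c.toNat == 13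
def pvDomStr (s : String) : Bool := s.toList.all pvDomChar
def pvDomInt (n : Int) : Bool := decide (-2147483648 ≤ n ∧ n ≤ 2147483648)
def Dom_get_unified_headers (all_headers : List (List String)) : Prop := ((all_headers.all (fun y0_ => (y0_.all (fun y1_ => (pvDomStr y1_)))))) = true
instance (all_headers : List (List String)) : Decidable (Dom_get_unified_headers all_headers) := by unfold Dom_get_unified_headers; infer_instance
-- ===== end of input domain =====

-- B builds a rank dict over the preferred order and produces the header list by one
-- keyed sort of all non-metadata fields, instead of A's filter + separate sort + concat.


-- ===== PORT A =====
def preferred_order : List String :=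
  ["Name", "Artist", "Composer", "Album", "Grouping", "Genre",
   "Size", "Time", "Disc Number", "Disc Count", "Track Number", "Track Count",
   "Year", "Date Modified", "Date", "Date Added",
   "Bit Rate", "Sample Rate", "Volume Adjustment",
   "Kind", "Equalizer", "Comments",
   "Play Count", "Last Played", "My Rating",
   "Location"]

def get_unified_headers (all_headers : List (List String)) : List String :=
  let all_fields : PySem.Set String :=
    all_headers.foldl (fun s headers => PySem.Set.update s headers) PySem.Set.empty
  let unified := preferred_order.filter (fun field => PySem.Set.contains all_fields field)
  let remaining := PySem.List.sorted
    (PySem.Set.diff (PySem.Set.diff all_fields (PySem.Set.ofList unified))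
      (PySem.Set.ofList ["_source_file", "_line_number"])) (fun x => x) false
  (unified ++ remaining) ++ ["_source_file", "_line_number"]

-- ===== PORT B =====
def pvRank : PySem.Dict String Int :=
  PySem.Dict.ofList ((PySem.List.enumerate preferred_order).map (fun p => (p.2, p.1)))

def get_unified_headers_alt (all_headers : List (List String)) : List String :=
  let all_fields : PySem.Set String :=
    all_headers.foldl (fun s headers => PySem.Set.union s headers) PySem.Set.empty
  let fields := PySem.Set.diff all_fields (PySem.Set.ofList ["_source_file", "_line_number"])
  let unified := PySem.List.sorted2 fields
    (fun f => PySem.Dict.getD pvRank f (preferred_order.length : Int)) (fun f => f) false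
  unified ++ ["_source_file", "_line_number"]

-- ===== PRECONDITION & SPEC =====
def Spec_get_unified_headers (all_headers : List (List String)) (out : List String) : Prop := out = get_unified_headers_alt all_headers
instance (all_headers : List (List String)) (out : List String) : Decidable (Spec_get_unified_headers all_headers out) := by unfold Spec_get_unified_headers; infer_instance

-- ===== CLAIM (what is proved, stated in full; the proofs are below) =====
def Claim_equal_get_unified_headers : Prop := ∀ (all_headers : List (List String)), Dom_get_unified_headers all_headers → Spec_get_unified_headers all_headers (get_unified_headers all_headers)

-- ===== LEMMAS AND PROOFS =====

-- The rank key used by B, and the lexicographic key it amounts to.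
def pvK1 (f : String) : Int := PySem.Dict.getD pvRank f (preferred_order.length : Int)
def pvKey (f : String) : Lex (Int × String) := toLex (pvK1 f, f)

theorem pvRank_keys : pvRank.keys = preferred_order := by decide

theorem pvRank_contains (f : String) : pvRank.contains f = decide (f ∈ preferred_order) := by
  rw [PySem.Dict.contains_eq_decide_mem_keys, pvRank_keys]

theorem pvK1_of_not_mem {f : String} (h : f ∉ preferred_order) : pvK1 f = 26 := by
  have hc : pvRank.contains f = false := by
    rw [pvRank_contains]; simpa using h
  unfold pvK1
  rw [PySem.Dict.getD_of_not_contains _ _ hc]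
  decide

theorem pvK1_lt_of_mem {f : String} (h : f ∈ preferred_order) : pvK1 f < 26 := by
  fin_cases h <;> decide

theorem pvPref_pairwise : List.Pairwise (fun a b => pvK1 a < pvK1 b) preferred_order := by decide

theorem pvPref_not_meta {f : String} (h : f ∈ preferred_order) :
    f ≠ "_source_file" ∧ f ≠ "_line_number" := by
  fin_cases h <;> exact ⟨by decide, by decide⟩

-- sorted2 with keys (k1, id) is sorted with the lexicographic key.
theorem pvSorted2_eq_sorted (xs : List String) (k1 : String → Int) :
    PySem.List.sorted2 xs k1 (fun x => x) false
      = PySem.List.sorted xs (fun x => toLex (k1 x, x)) false := by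
  unfold PySem.List.sorted2 PySem.List.sorted
  simp only [if_neg (by decide : ¬ (false = true))]
  congr 1
  funext acc x
  congr 1
  funext a b
  by_cases h1 : k1 a < k1 b
  · simp [h1, Prod.Lex.lt_iff]
  · by_cases h2 : k1 b < k1 a
    · have hne : k1 a ≠ k1 b := by omega
      simp [h1, h2, Prod.Lex.lt_iff, hne]
    · have heq : k1 a = k1 b := by omega
      by_cases h3 : a < b <;> simp [h3, Prod.Lex.lt_iff, heq]

theorem pvNodup_fold (ls : List (List String)) (s : PySem.Set String) (hs : s.Nodup) :
    (ls.foldl (fun s h => PySem.Set.update s h) s).Nodup := by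
  induction ls generalizing s with
  | nil => exact hs
  | cons h t ih => exact ih _ (PySem.Set.nodup_update s h hs)

theorem get_unified_headers_eq (all_headers : List (List String)) :
    get_unified_headers all_headers = get_unified_headers_alt all_headers := by
  unfold get_unified_headers get_unified_headers_alt
  simp only [PySem.Set.union_eq_update]
  set S : PySem.Set String :=
    all_headers.foldl (fun s headers => PySem.Set.update s headers) PySem.Set.empty with hSdef
  have hS : S.Nodup := pvNodup_fold all_headers PySem.Set.empty List.nodup_nil
  set unifiedA := preferred_order.filter (fun field => PySem.Set.contains S field) with hUdef
  set R := PySem.Set.diff (PySem.Set.diff S (PySem.Set.ofList unifiedA))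
      (PySem.Set.ofList ["_source_file", "_line_number"]) with hRdef
  set remaining := PySem.List.sorted R (fun x => x) false with hremdef
  set fields := PySem.Set.diff S (PySem.Set.ofList ["_source_file", "_line_number"]) with hFdef
  -- membership characterisations
  have hmemU : ∀ x, x ∈ unifiedA ↔ x ∈ preferred_order ∧ x ∈ S := by
    intro x
    simp [hUdef, List.mem_filter]
  have hmemR : ∀ x, x ∈ R ↔ x ∈ S ∧ x ∉ unifiedA ∧
      x ∉ (["_source_file", "_line_number"] : List String) := by
    intro x
    simp [hRdef, PySem.Set.mem_diff, PySem.Set.mem_ofList, and_assoc]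
  have hmemRem : ∀ x, x ∈ remaining ↔ x ∈ R := by
    intro x; exact PySem.List.mem_sorted R (fun x => x) false x
  have hmemF : ∀ x, x ∈ fields ↔ x ∈ S ∧
      x ∉ (["_source_file", "_line_number"] : List String) := by
    intro x
    simp [hFdef, PySem.Set.mem_diff, PySem.Set.mem_ofList]
  -- an element of remaining is not preferred
  have hRemNotPref : ∀ x ∈ remaining, x ∉ preferred_order := by
    intro x hx hp
    rcases (hmemR x).1 ((hmemRem x).1 hx) with ⟨hxS, hxU, _⟩
    exact hxU ((hmemU x).2 ⟨hp, hxS⟩)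
  -- nodup facts
  have hUnodup : unifiedA.Nodup :=
    (by decide : preferred_order.Nodup).filter _
  have hRnodup : R.Nodup :=
    PySem.Set.nodup_diff _ _ (PySem.Set.nodup_diff _ _ hS)
  have hRemNodup : remaining.Nodup :=
    ((PySem.List.sorted_perm R (fun x => x) false).symm.nodup hRnodup)
  have hFnodup : fields.Nodup := PySem.Set.nodup_diff _ _ hS
  -- the permutation
  have hperm : (unifiedA ++ remaining).Perm fields := by
    rw [List.perm_ext_iff_of_nodup ?_ hFnodup]
    · intro a
      simp only [List.mem_append, hmemU, hmemRem, hmemR, hmemF]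
      constructor
      · rintro (⟨hp, hs⟩ | ⟨hs, _, hm⟩)
        · rcases pvPref_not_meta hp with ⟨h1, h2⟩
          exact ⟨hs, by simp [h1, h2]⟩
        · exact ⟨hs, hm⟩
      · rintro ⟨hs, hm⟩
        by_cases hp : a ∈ preferred_order
        · exact Or.inl ⟨hp, hs⟩
        · exact Or.inr ⟨hs, fun hu => hp hu.1, hm⟩
    · rw [List.nodup_append]
      refine ⟨hUnodup, hRemNodup, ?_⟩
      intro a ha b hb hab
      subst hab
      exact hRemNotPref a hb ((hmemU a).1 ha).1
  -- the order
  have hpair : List.Pairwise (fun a b => pvKey a < pvKey b) (unifiedA ++ remaining) := by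
    rw [List.pairwise_append]
    refine ⟨?_, ?_, ?_⟩
    · exact (pvPref_pairwise.filter _).imp (fun h => by
        simp only [pvKey, Prod.Lex.lt_iff]; exact Or.inl h)
    · have hle : List.Pairwise (fun a b : String => a ≤ b) remaining :=
        PySem.List.sorted_pairwise R (fun x => x)
      refine ((hle.and hRemNodup).imp_of_mem ?_)
      intro a b ha hb hab
      have h26a : pvK1 a = 26 := pvK1_of_not_mem (hRemNotPref a ha)
      have h26b : pvK1 b = 26 := pvK1_of_not_mem (hRemNotPref b hb)
      simp only [pvKey, Prod.Lex.lt_iff]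
      exact Or.inr ⟨by simp [h26a, h26b], lt_of_le_of_ne hab.1 hab.2⟩
    · intro a ha b hb
      have hpa : a ∈ preferred_order := ((hmemU a).1 ha).1
      have h26b : pvK1 b = 26 := pvK1_of_not_mem (hRemNotPref b hb)
      simp only [pvKey, Prod.Lex.lt_iff]
      exact Or.inl (by rw [h26b]; exact pvK1_lt_of_mem hpa)
  have hmain : unifiedA ++ remaining = PySem.List.sorted fields pvKey false :=
    (PySem.List.sorted_eq_of_perm_of_pairwise_lt fields (unifiedA ++ remaining) pvKey hperm hpair).symm
  calc (unifiedA ++ remaining) ++ ["_source_file", "_line_number"]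
      = PySem.List.sorted fields pvKey false ++ ["_source_file", "_line_number"] := by rw [hmain]
    _ = PySem.List.sorted2 fields
          (fun f => PySem.Dict.getD pvRank f (preferred_order.length : Int)) (fun f => f) false
          ++ ["_source_file", "_line_number"] := by
        rw [pvSorted2_eq_sorted fields (fun f => PySem.Dict.getD pvRank f (preferred_order.length : Int))]
        rfl

-- ===== VERDICT (by name: the statement is the Claim_ definition above) =====
theorem get_unified_headers_spec : Claim_equal_get_unified_headers := by
  intro all_headers _
  exact get_unified_headers_eq all_headers
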